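-- pv_equiv track=rewrite | github.com/Wolves-SoftWare/SpaceColony | src/SSG/Functions/Functions.py | determineClimate
-- ===== SOURCE A (Python) =====
-- def determineClimate(Cryosphere,Hydrosphere,Humidity):
--     Climate = dict()
--     if   Cryosphere <= 30:  Cryosphere = "Low"
--     elif Cryosphere >= 70:  Cryosphere = "High"
--     else:                   Cryosphere = "Medium"
--     if   Hydrosphere <= 30: Hydrosphere = "Low"
--     elif Hydrosphere >= 70: Hydrosphere = "High"
--     else:                   Hydrosphere = "Medium"
--     if   Humidity <= 30:    Humidity = "Low"
--     elif Humidity >= 70:    Humidity = "High"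
--     else:                   Humidity = "Medium"
--
--     Climate["Hot Desertic"] =       ("Low","Low","Low")
--     Climate["Savannah"] =           ("Low","Medium","Medium")
--     Climate["Jungle"] =             ("Low","High","High")
--     Climate["Tropical"] =           ("Medium","Medium","Medium")
--     Climate["Cool RainForest"] =    ("Medium","High","High")
--     Climate["Cold Desertic"] =      ("High","Low","Low")
--     Climate["Artic"] =              ("High","Medium","Medium")
--
--     output = "Undetermined Climate"  # Climat par defaut
--     for currentClimate in Climate.keys():
--         # Recupere un nouveau climat si le tuple correspond
--         if (Cryosphere,Hydrosphere,Humidity) == Climate[currentClimate]: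
--             output = currentClimate
--
--     return output
-- ===== SOURCE B (Python) =====
-- # All seven named climates require the Hydrosphere and Humidity bands to coincide;
-- # so bucket each stat to 0/1/2, demand equal hydro/humidity bands, and index a 3x3 grid.
-- _GRID = [
--     ["Hot Desertic", "Savannah", "Jungle"],          # cryo band 0 (low)
--     [None,           "Tropical", "Cool RainForest"], # cryo band 1 (medium)
--     ["Cold Desertic", "Artic",   None],              # cryo band 2 (high)
-- ]
--
-- def _band(x):
--     return 0 if x <= 30 else (2 if x >= 70 else 1)
--
-- def determineClimate(Cryosphere, Hydrosphere, Humidity):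
--     h = _band(Hydrosphere)
--     if h != _band(Humidity):
--         return "Undetermined Climate"
--     name = _GRID[_band(Cryosphere)][h]
--     return name if name is not None else "Undetermined Climate"
-- ===== Notes on version B (the rewrite author's own statement) =====
-- stated objective: alternative
-- what changed: Replaced the string-level bucketing plus name-keyed dict and seven-entry last-match scan with numeric band indices, an early check that the hydrosphere and humidity bands coincide (true of all seven named climates), and one arithmetic index into a 3x3 grid of names.
import Mathlib
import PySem

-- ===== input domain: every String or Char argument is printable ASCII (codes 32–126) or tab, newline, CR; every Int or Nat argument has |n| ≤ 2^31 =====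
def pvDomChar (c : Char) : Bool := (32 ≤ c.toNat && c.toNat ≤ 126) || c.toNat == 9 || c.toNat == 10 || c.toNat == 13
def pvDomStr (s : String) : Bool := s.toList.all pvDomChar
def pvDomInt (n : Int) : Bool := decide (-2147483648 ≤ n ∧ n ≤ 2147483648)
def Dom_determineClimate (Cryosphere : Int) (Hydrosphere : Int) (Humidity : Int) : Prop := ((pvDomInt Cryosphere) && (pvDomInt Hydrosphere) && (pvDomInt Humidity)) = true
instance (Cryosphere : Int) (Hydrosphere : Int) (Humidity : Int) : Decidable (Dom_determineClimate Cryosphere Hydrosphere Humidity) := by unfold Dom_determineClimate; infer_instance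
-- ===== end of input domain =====

-- B drops A's string-level dict scan: numeric band indices, an equal-bands check for
-- hydrosphere/humidity, and one arithmetic index into a 3x3 grid (alternative; same cost).


-- ===== PORT A =====
def determineClimate (Cryosphere : Int) (Hydrosphere : Int) (Humidity : Int) : String :=
  let Cryosphere' : String := if Cryosphere ≤ 30 then "Low" else if Cryosphere ≥ 70 then "High" else "Medium"
  let Hydrosphere' : String := if Hydrosphere ≤ 30 then "Low" else if Hydrosphere ≥ 70 then "High" else "Medium"
  let Humidity' : String := if Humidity ≤ 30 then "Low" else if Humidity ≥ 70 then "High" else "Medium"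
  let Climate : PySem.Dict String (String × String × String) :=
    ((((((PySem.Dict.empty
      |>.insert "Hot Desertic"    ("Low", "Low", "Low"))
      |>.insert "Savannah"        ("Low", "Medium", "Medium"))
      |>.insert "Jungle"          ("Low", "High", "High"))
      |>.insert "Tropical"        ("Medium", "Medium", "Medium"))
      |>.insert "Cool RainForest" ("Medium", "High", "High"))
      |>.insert "Cold Desertic"   ("High", "Low", "Low"))
      |>.insert "Artic"           ("High", "Medium", "Medium")
  Climate.keys.foldl (fun output currentClimate =>
    if (Cryosphere', Hydrosphere', Humidity') = Climate.getD currentClimate ("", "", "") then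
      currentClimate
    else output) "Undetermined Climate"

-- ===== PORT B =====
-- 3x3 grid of names, rows indexed by the cryosphere band, columns by the shared
-- hydrosphere/humidity band; None marks the two unnamed cells.
def climateGrid : List (List (Option String)) :=
  [ [some "Hot Desertic",  some "Savannah", some "Jungle"],
    [none,                 some "Tropical", some "Cool RainForest"],
    [some "Cold Desertic", some "Artic",    none] ]

def band (x : Int) : Int := if x ≤ 30 then 0 else if x ≥ 70 then 2 else 1

def determineClimate_alt (Cryosphere : Int) (Hydrosphere : Int) (Humidity : Int) : String :=
  let h := band Hydrosphere
  if h ≠ band Humidity then "Undetermined Climate"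
  else
    -- grid indexing; indices are always 0/1/2 so pyGet? is total here
    match PySem.List.pyGet? climateGrid (band Cryosphere) with
    | some row =>
      match PySem.List.pyGet? row h with
      | some (some name) => name
      | _ => "Undetermined Climate"
    | none => "Undetermined Climate"

-- ===== PRECONDITION & SPEC =====
def Spec_determineClimate (Cryosphere : Int) (Hydrosphere : Int) (Humidity : Int) (out : String) : Prop := out = determineClimate_alt Cryosphere Hydrosphere Humidity
instance (Cryosphere : Int) (Hydrosphere : Int) (Humidity : Int) (out : String) : Decidable (Spec_determineClimate Cryosphere Hydrosphere Humidity out) := by unfold Spec_determineClimate; infer_instance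

-- ===== CLAIM (what is proved, stated in full; the proofs are below) =====
def Claim_equal_determineClimate : Prop := ∀ (Cryosphere : Int) (Hydrosphere : Int) (Humidity : Int), Dom_determineClimate Cryosphere Hydrosphere Humidity → Spec_determineClimate Cryosphere Hydrosphere Humidity (determineClimate Cryosphere Hydrosphere Humidity)

-- ===== LEMMAS AND PROOFS =====
-- After splitting the six threshold tests, each of the 27 cases is a closed computation.
theorem determineClimate_eq (Cryosphere Hydrosphere Humidity : Int) :
    determineClimate Cryosphere Hydrosphere Humidity
      = determineClimate_alt Cryosphere Hydrosphere Humidity := by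
  unfold determineClimate determineClimate_alt band
  split_ifs <;> decide

-- ===== VERDICT (by name: the statement is the Claim_ definition above) =====
theorem determineClimate_spec : Claim_equal_determineClimate := by
  intro c h u _
  exact determineClimate_eq c h u
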